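-- pv_equiv track=rewrite | github.com/cms-sw/cmssw | FWCore/GuiBrowsers/python/Vispa/Plugins/EdmBrowser/EventContentDataAccessor.py | applyCommands
-- ===== SOURCE A (Python) =====
-- def applyCommands(content, outputCommands):
--     keep = {}
--     if len(outputCommands)>0 and outputCommands[0]!="keep *":
--         for object in content:
--             keep[object] = False
--     else:
--         for object in content:
--             keep[object] = True
--     for o in outputCommands:
--         command, filter = o.split(" ")
--         if len(filter.split("_")) > 1:
--             module = filter.split("_")[1]
--             product = filter.split("_")[2]
--             process = filter.split("_")[3]
--         else:
--             module = filter
--             product = "*"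
--             process = "*"
--         for object in content:
--             if "*" in module:
--                 match = module.strip("*") in object[1]
--             else:
--                 match = module == object[1]
--             if "*" in product:
--                 match = match and product.strip("*") in object[2]
--             else:
--                 match = match and product == object[2]
--             if "*" in process:
--                 match = match and process.strip("*") in object[3]
--             else:
--                 match = match and process == object[3]
--             if match:
--                 keep[object] = command == "keep"
--     return [object for object in content if keep[object]]
-- ===== SOURCE B (Python) =====
-- def _matches(pat, val):
--     if "*" in pat:
--         return pat.strip("*") in val
--     return pat == val
--
-- def applyCommands(content, outputCommands):
--     parsed = []
--     for o in outputCommands: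
--         command, filter = o.split(" ")
--         parts = filter.split("_")
--         if len(parts) > 1:
--             parsed.append((command == "keep", parts[1], parts[2], parts[3]))
--         else:
--             parsed.append((command == "keep", filter, "*", "*"))
--     default = len(outputCommands) == 0
--     result = []
--     for obj in content:
--         verdict = default
--         for k, module, product, process in reversed(parsed):
--             if _matches(module, obj[1]) and _matches(product, obj[2]) and _matches(process, obj[3]):
--                 verdict = k
--                 break
--         if verdict:
--             result.append(obj)
--     return result
-- ===== Notes on version B (the rewrite author's own statement) =====
-- stated objective: alternative
-- what changed: A builds a keep-dict by sweeping the whole content list once per command (last matching command wins by overwrite); B pre-parses the commands once and resolves each object independently by an early-exit reverse scan of the parsed commands (first match in reverse order wins), with no dict at all.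
import Mathlib
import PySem

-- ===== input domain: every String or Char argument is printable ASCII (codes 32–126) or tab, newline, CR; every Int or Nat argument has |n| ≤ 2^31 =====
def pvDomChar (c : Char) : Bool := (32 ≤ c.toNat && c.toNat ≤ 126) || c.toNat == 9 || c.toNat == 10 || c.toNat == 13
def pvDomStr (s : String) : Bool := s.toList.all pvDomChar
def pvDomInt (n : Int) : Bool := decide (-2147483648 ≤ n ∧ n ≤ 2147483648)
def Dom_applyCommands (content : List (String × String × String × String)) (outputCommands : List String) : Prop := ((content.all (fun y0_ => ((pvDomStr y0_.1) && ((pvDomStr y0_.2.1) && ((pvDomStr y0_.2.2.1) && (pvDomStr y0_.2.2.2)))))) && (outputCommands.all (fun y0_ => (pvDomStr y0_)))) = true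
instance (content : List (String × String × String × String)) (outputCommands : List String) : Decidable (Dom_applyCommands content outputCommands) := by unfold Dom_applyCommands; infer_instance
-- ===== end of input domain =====

-- B replaces A's keep-dict built by a full pass over content per command with a
-- per-object reverse scan of the pre-parsed commands (first match wins); objective:
-- alternative decomposition, same result.

-- ===== PORT A =====
-- one step of A's inner 'for object in content' loop (match computed sequentially, as in A)
def pvMatchStep (command module product process : String)
    (d : PySem.Dict (String × String × String × String) Bool)
    (obj : String × String × String × String) :
    PySem.Dict (String × String × String × String) Bool :=
  let match1 := if PySem.Str.isIn "*" module then
      PySem.Str.isIn (PySem.Str.stripChars module "*") obj.2.1 else module == obj.2.1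
  let match2 := if PySem.Str.isIn "*" product then
      match1 && PySem.Str.isIn (PySem.Str.stripChars product "*") obj.2.2.1 else match1 && (product == obj.2.2.1)
  let match3 := if PySem.Str.isIn "*" process then
      match2 && PySem.Str.isIn (PySem.Str.stripChars process "*") obj.2.2.2 else match2 && (process == obj.2.2.2)
  if match3 then d.insert obj (command == "keep") else d

-- body of A's 'for o in outputCommands' loop (parse the command, then sweep content)
def pvCmdPass (content : List (String × String × String × String))
    (d : PySem.Dict (String × String × String × String) Bool) (o : String) :
    PySem.Dict (String × String × String × String) Bool :=
  let parts := (PySem.Str.split? o " ").getD []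
  let command := (PySem.List.pyGet? parts 0).getD ""   -- Pre_ guarantees exactly 2 parts
  let filter := (PySem.List.pyGet? parts 1).getD ""
  let fparts := (PySem.Str.split? filter "_").getD []
  let mpp :=
    if 1 < fparts.length then
      ((PySem.List.pyGet? fparts 1).getD "", (PySem.List.pyGet? fparts 2).getD "",
       (PySem.List.pyGet? fparts 3).getD "")
    else (filter, "*", "*")
  content.foldl (pvMatchStep command mpp.1 mpp.2.1 mpp.2.2) d

def applyCommands (content : List (String × String × String × String)) (outputCommands : List String) : List (String × String × String × String) :=
  let keep : PySem.Dict (String × String × String × String) Bool :=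
    if 0 < outputCommands.length ∧ (PySem.List.pyGet? outputCommands 0).getD "" ≠ "keep *" then
      content.foldl (fun d obj => d.insert obj false) PySem.Dict.empty
    else
      content.foldl (fun d obj => d.insert obj true) PySem.Dict.empty
  let keep2 := outputCommands.foldl (pvCmdPass content) keep
  content.filter (fun obj => keep2.getD obj false)   -- key always present: keep was initialised for every obj

-- ===== PORT B =====
def pvMatches (pat val : String) : Bool :=
  if PySem.Str.isIn "*" pat then PySem.Str.isIn (PySem.Str.stripChars pat "*") val else pat == val

def pvParse (o : String) : Bool × String × String × String :=
  let parts := (PySem.Str.split? o " ").getD []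
  let command := (PySem.List.pyGet? parts 0).getD ""
  let filter := (PySem.List.pyGet? parts 1).getD ""
  let fparts := (PySem.Str.split? filter "_").getD []
  if 1 < fparts.length then
    (command == "keep", (PySem.List.pyGet? fparts 1).getD "",
     (PySem.List.pyGet? fparts 2).getD "", (PySem.List.pyGet? fparts 3).getD "")
  else
    (command == "keep", filter, "*", "*")

-- B's inner loop: reverse scan with early exit (first matching command decides)
def pvScan (obj : String × String × String × String)
    (cmds : List (Bool × String × String × String)) (dflt : Bool) : Bool :=
  match cmds with
  | [] => dflt
  | c :: rest =>
    if pvMatches c.2.1 obj.2.1 && pvMatches c.2.2.1 obj.2.2.1 && pvMatches c.2.2.2 obj.2.2.2 then c.1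
    else pvScan obj rest dflt

def applyCommands_alt (content : List (String × String × String × String)) (outputCommands : List String) : List (String × String × String × String) :=
  let parsed := outputCommands.map pvParse
  let dflt := outputCommands.length == 0
  content.filter (fun obj => pvScan obj parsed.reverse dflt)

-- ===== PRECONDITION & SPEC =====
-- Pre_ excludes exactly the inputs where the Python raises: a command that does not
-- split on " " into exactly 2 pieces (ValueError on unpacking) or whose filter splits
-- on "_" into 2 or 3 pieces (IndexError); B raises identically there.
def Pre_applyCommands (content : List (String × String × String × String)) (outputCommands : List String) : Prop :=
  ∀ o ∈ outputCommands,
    ((PySem.Str.split? o " ").getD []).length = 2 ∧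
    (((PySem.Str.split? ((PySem.List.pyGet? ((PySem.Str.split? o " ").getD []) 1).getD "") "_").getD []).length = 1 ∨
     4 ≤ ((PySem.Str.split? ((PySem.List.pyGet? ((PySem.Str.split? o " ").getD []) 1).getD "") "_").getD []).length)
instance (content : List (String × String × String × String)) (outputCommands : List String) : Decidable (Pre_applyCommands content outputCommands) := by unfold Pre_applyCommands; infer_instance
def pvWitness_applyCommands : (List (String × String × String × String)) × List String :=
  ([("type_a", "modA", "prodA", "PROC")], ["keep *", "drop *modA*"])

def Spec_applyCommands (content : List (String × String × String × String)) (outputCommands : List String) (out : List (String × String × String × String)) : Prop := out = applyCommands_alt content outputCommands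
instance (content : List (String × String × String × String)) (outputCommands : List String) (out : List (String × String × String × String)) : Decidable (Spec_applyCommands content outputCommands out) := by unfold Spec_applyCommands; infer_instance

-- ===== CLAIM (what is proved, stated in full; the proofs are below) =====
def Claim_equal_applyCommands : Prop := ∀ (content : List (String × String × String × String)) (outputCommands : List String), Dom_applyCommands content outputCommands → Pre_applyCommands content outputCommands → Spec_applyCommands content outputCommands (applyCommands content outputCommands)

-- ===== LEMMAS AND PROOFS =====

-- the abstract per-command match predicate shared by both ports
def pvM (c : Bool × String × String × String) (obj : String × String × String × String) : Bool :=
  pvMatches c.2.1 obj.2.1 && pvMatches c.2.2.1 obj.2.2.1 && pvMatches c.2.2.2 obj.2.2.2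

-- forward (A-order) resolution of the verdict for one object
def pvFwd (obj : String × String × String × String)
    (cs : List (Bool × String × String × String)) (v : Bool) : Bool :=
  cs.foldl (fun v c => if pvM c obj then c.1 else v) v

theorem pvMatchStep_eq (command module product process : String)
    (d : PySem.Dict (String × String × String × String) Bool)
    (obj : String × String × String × String) :
    pvMatchStep command module product process d obj =
      if pvM (command == "keep", module, product, process) obj
      then d.insert obj (command == "keep") else d := by
  simp only [pvMatchStep, pvM, pvMatches]
  split_ifs <;> simp_all [Bool.and_assoc]

theorem pvInit_get (l : List (String × String × String × String)) (b : Bool)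
    (d0 : PySem.Dict (String × String × String × String) Bool)
    (obj : String × String × String × String) :
    ((l.foldl (fun d x => d.insert x b) d0).get? obj) =
      if obj ∈ l then some b else d0.get? obj := by
  induction l generalizing d0 with
  | nil => simp
  | cons x xs ih =>
    simp only [List.foldl_cons, ih, List.mem_cons]
    by_cases h1 : obj ∈ xs <;> by_cases h2 : obj = x <;>
      simp [h1, h2, PySem.Dict.get?_insert]

theorem pvInner_get (m : (String × String × String × String) → Bool) (b : Bool)
    (l : List (String × String × String × String))
    (d : PySem.Dict (String × String × String × String) Bool)
    (obj : String × String × String × String) :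
    ((l.foldl (fun d x => if m x then d.insert x b else d) d).get? obj) =
      if obj ∈ l ∧ m obj then some b else d.get? obj := by
  induction l generalizing d with
  | nil => simp
  | cons x xs ih =>
    simp only [List.foldl_cons, ih, List.mem_cons]
    by_cases h1 : obj ∈ xs ∧ m obj
    · simp [h1]
    · by_cases h2 : obj = x <;> by_cases h3 : m x <;>
        simp_all [PySem.Dict.get?_insert]
theorem pvBody_eq (content : List (String × String × String × String)) (o : String)
    (d : PySem.Dict (String × String × String × String) Bool) :
    pvCmdPass content d o =
    content.foldl (fun d x => if pvM (pvParse o) x then d.insert x (pvParse o).1 else d) d := by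
  simp only [pvCmdPass, pvParse]
  split_ifs with h <;>
  · apply PySem.List.foldl_congr_mem
    intro acc x hx
    rw [pvMatchStep_eq]

theorem pvOuter_get (content : List (String × String × String × String))
    (cmds : List String)
    (d : PySem.Dict (String × String × String × String) Bool)
    (obj : String × String × String × String) (hobj : obj ∈ content) (v : Bool)
    (hd : d.get? obj = some v) :
    ((cmds.foldl (pvCmdPass content) d).get? obj) =
      some (pvFwd obj (cmds.map pvParse) v) := by
  induction cmds generalizing d v with
  | nil => simpa [pvFwd]
  | cons o os ih =>
    simp only [List.foldl_cons, List.map_cons]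
    have hstep : ((pvCmdPass content d o).get? obj) =
        some (if pvM (pvParse o) obj then (pvParse o).1 else v) := by
      rw [pvBody_eq, pvInner_get]
      by_cases hm : pvM (pvParse o) obj <;> simp [hm, hobj, hd]
    rw [ih _ _ hstep]
    simp [pvFwd]

theorem pvScan_append (obj : String × String × String × String)
    (l : List (Bool × String × String × String)) (c : Bool × String × String × String)
    (v : Bool) :
    pvScan obj (l ++ [c]) v = pvScan obj l (if pvM c obj then c.1 else v) := by
  induction l with
  | nil => by_cases h : pvM c obj <;> simp_all [pvScan, pvM]
  | cons x xs ih => by_cases h : pvM x obj <;> simp_all [pvScan, pvM]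

theorem pvFwd_eq_scan (obj : String × String × String × String)
    (cs : List (Bool × String × String × String)) (v : Bool) :
    pvFwd obj cs v = pvScan obj cs.reverse v := by
  induction cs generalizing v with
  | nil => simp [pvFwd, pvScan]
  | cons c cs ih =>
    simp only [pvFwd, List.foldl_cons, List.reverse_cons, pvScan_append]
    exact ih _

theorem pvMatches_star (v : String) : pvMatches "*" v = true := by
  have h1 : PySem.Str.isIn "*" "*" = true := by decide
  have h2 : PySem.Str.stripChars "*" "*" = "" := by decide
  rw [pvMatches, if_pos h1, h2, PySem.Str.isIn_iff_infix]
  simp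

theorem pvParse_keepstar : pvParse "keep *" = (true, "*", "*", "*") := by decide

theorem pvFwd_keepstar (obj : String × String × String × String)
    (cs : List (Bool × String × String × String)) (v : Bool) :
    pvFwd obj ((true, "*", "*", "*") :: cs) v = pvFwd obj cs true := by
  simp [pvFwd, pvM, pvMatches_star]

theorem pvGet?_zero_cons (x : String) (l : List String) :
    PySem.List.pyGet? (x :: l) (0 : Int) = some x := by
  simp [PySem.List.pyGet?, PySem.List.pyIdx?]

-- ===== VERDICT (by name: the statement is the Claim_ definition above) =====
theorem applyCommands_spec : Claim_equal_applyCommands := by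
  intro content cmds _hdom _hpre
  unfold Spec_applyCommands applyCommands applyCommands_alt
  apply List.filter_congr
  intro obj hobj
  cases cmds with
  | nil =>
    rw [if_neg (by simp)]
    rw [List.foldl_nil, PySem.Dict.getD_eq_get?_getD, pvInit_get]
    simp [hobj, pvScan]
  | cons o0 os =>
    have hlen : (((o0 :: os).length == 0) : Bool) = false := by simp
    by_cases h0 : o0 = "keep *"
    · rw [if_neg (by simp [h0])]
      rw [PySem.Dict.getD_eq_get?_getD,
        pvOuter_get content (o0 :: os) _ obj hobj true (by rw [pvInit_get]; simp [hobj])]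
      rw [Option.getD_some, hlen]
      simp only [List.map_cons, h0, pvParse_keepstar]
      rw [← pvFwd_eq_scan, pvFwd_keepstar, pvFwd_keepstar]
    · rw [if_pos ⟨by simp, by rw [pvGet?_zero_cons]; simpa using h0⟩]
      rw [PySem.Dict.getD_eq_get?_getD,
        pvOuter_get content (o0 :: os) _ obj hobj false (by rw [pvInit_get]; simp [hobj])]
      rw [Option.getD_some, hlen, pvFwd_eq_scan]
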